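-- pv_equiv track=rewrite | github.com/Sambo3975/advent-of-code-2020 | day_10_adapter_array/solution.py | list_removable
-- ===== SOURCE A (Python) =====
-- def list_removable(adapters):
--     ls = []
--     if adapters[0] == 1:
--         ls.append(1)
--     for i in range(1, len(adapters) - 1):
--         if adapters[i] - adapters[i - 1] == 1 and adapters[i + 1] - adapters[i] == 1:
--             ls.append(adapters[i])
--     return ls
-- ===== SOURCE B (Python) =====
-- def list_removable(adapters):
--     ls = [1] if adapters[0] == 1 else []
--     run_start = 0
--     for i in range(1, len(adapters)):
--         if adapters[i] - adapters[i - 1] != 1: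
--             ls.extend(adapters[run_start + 1:i - 1])
--             run_start = i
--     ls.extend(adapters[run_start + 1:len(adapters) - 1])
--     return ls
-- ===== Notes on version B (the rewrite author's own statement) =====
-- stated objective: alternative
-- what changed: A tests every index's two neighbour differences independently; B sweeps once detecting maximal runs of consecutive integers and emits each run's interior as a slice (run endpoints and the list's last element never emitted), keeping the first==1 seed.
-- outside the precondition, e.g. on list_removable([]): A raises IndexError, B raises IndexError
import Mathlib
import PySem

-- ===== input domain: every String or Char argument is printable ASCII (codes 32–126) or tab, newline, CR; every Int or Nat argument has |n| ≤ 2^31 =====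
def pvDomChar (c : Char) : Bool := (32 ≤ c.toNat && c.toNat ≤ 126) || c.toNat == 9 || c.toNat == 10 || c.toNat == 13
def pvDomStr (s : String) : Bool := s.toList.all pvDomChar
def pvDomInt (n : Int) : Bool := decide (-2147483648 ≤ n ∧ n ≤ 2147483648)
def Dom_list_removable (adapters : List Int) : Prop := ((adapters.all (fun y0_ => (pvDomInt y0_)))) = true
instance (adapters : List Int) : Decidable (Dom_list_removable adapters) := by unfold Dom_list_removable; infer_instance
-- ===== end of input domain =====

-- B replaces A's per-index neighbour-difference test with a single sweep that detects
-- maximal runs of consecutive integers and emits each run's interior via a slice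
-- (alternative decomposition, same cost; return value only, no mutation observable).

-- ===== PORT A =====
def list_removable (adapters : List Int) : List Int :=
  let ls : List Int := if PySem.List.pyGetD adapters 0 0 = 1 then [1] else []
  (PySem.List.pyRange 1 ((adapters.length : Int) - 1) 1).foldl
    (fun ls i =>
      if PySem.List.pyGetD adapters i 0 - PySem.List.pyGetD adapters (i - 1) 0 = 1 ∧
         PySem.List.pyGetD adapters (i + 1) 0 - PySem.List.pyGetD adapters i 0 = 1
      then ls ++ [PySem.List.pyGetD adapters i 0]
      else ls)
    ls

-- ===== PORT B =====
def list_removable_alt (adapters : List Int) : List Int :=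
  let ls : List Int := if PySem.List.pyGetD adapters 0 0 = 1 then [1] else []
  let st :=
    (PySem.List.pyRange 1 (adapters.length : Int) 1).foldl
      (fun st i =>
        if PySem.List.pyGetD adapters i 0 - PySem.List.pyGetD adapters (i - 1) 0 ≠ 1 then
          (st.1 ++ PySem.List.slice adapters (some (st.2 + 1)) (some (i - 1)), i)
        else st)
      (ls, (0 : Int))
  st.1 ++ PySem.List.slice adapters (some (st.2 + 1)) (some ((adapters.length : Int) - 1))

-- ===== PRECONDITION & SPEC =====
-- Pre_ excludes only the empty list, on which Python A (adapters[0]) raises IndexError.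
def Pre_list_removable (adapters : List Int) : Prop := adapters ≠ []
instance (adapters : List Int) : Decidable (Pre_list_removable adapters) := by
  unfold Pre_list_removable; infer_instance
def pvWitness_list_removable : List Int := ([1, 2, 3, 5, 6, 9])
def Spec_list_removable (adapters : List Int) (out : List Int) : Prop := out = list_removable_alt adapters
instance (adapters : List Int) (out : List Int) : Decidable (Spec_list_removable adapters out) := by unfold Spec_list_removable; infer_instance

-- ===== CLAIM (what is proved, stated in full; the proofs are below) =====
def Claim_equal_list_removable : Prop := ∀ (adapters : List Int), Dom_list_removable adapters → Pre_list_removable adapters → Spec_list_removable adapters (list_removable adapters)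

-- ===== LEMMAS AND PROOFS =====

-- B's loop body, named for the proofs (definitionally the lambda in the port).
def pvStepB (a : List Int) (st : List Int × Int) (i : Int) : List Int × Int :=
  if PySem.List.pyGetD a i 0 - PySem.List.pyGetD a (i - 1) 0 ≠ 1 then
    (st.1 ++ PySem.List.slice a (some (st.2 + 1)) (some (i - 1)), i)
  else st

-- Growing a take-from-drop window by one element.
lemma pvTakeSnoc (a : List Int) (p m : Nat) (h : p + m < a.length) :
    (a.drop p).take (m + 1) = (a.drop p).take m ++ [a.getD (p + m) 0] := by
  rw [List.take_add_one]
  simp [List.getElem?_drop, List.getElem?_eq_getElem h]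

-- Loop invariant of B's sweep: after processing indices 1..k-1 the pending run starts
-- at r, everything strictly inside it is consecutive, and the emitted output plus the
-- pending interior equals A's filtered output over indices 1..k-2.
lemma pvInvB (a ls0 : List Int) (k : Nat) (hk : 1 ≤ k) (hkn : k ≤ a.length) :
    ∃ (L : List Int) (r : Nat),
      (PySem.List.pyRange 1 (k : Int) 1).foldl (pvStepB a) (ls0, 0) = (L, (r : Int)) ∧
      r < k ∧
      (r = 0 ∨ a.getD r 0 - a.getD (r - 1) 0 ≠ 1) ∧
      (∀ j : Nat, r < j → j < k → a.getD j 0 - a.getD (j - 1) 0 = 1) ∧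
      L ++ (a.drop (r + 1)).take (k - 1 - (r + 1)) =
        ls0 ++ ((PySem.List.pyRange 1 ((k : Int) - 1) 1).filter
          (fun i => decide (PySem.List.pyGetD a i 0 - PySem.List.pyGetD a (i - 1) 0 = 1 ∧
                            PySem.List.pyGetD a (i + 1) 0 - PySem.List.pyGetD a i 0 = 1))).map
          (fun i => PySem.List.pyGetD a i 0) := by
  induction k, hk using Nat.le_induction with
  | base =>
      refine ⟨ls0, 0, ?_, by omega, Or.inl rfl, by omega, ?_⟩
      · simp [PySem.List.pyRange_one_eq_nil]
      · simp [PySem.List.pyRange_one_eq_nil]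
  | succ k hk ih =>
      have hklt : k < a.length := by omega
      obtain ⟨L, r, hfold, hrk, hrs, hrun, heq⟩ := ih (by omega)
      have hrange : PySem.List.pyRange 1 ((k+1 : Nat) : Int) 1
          = PySem.List.pyRange 1 (k : Int) 1 ++ [(k : Int)] := by
        rw [show ((k+1 : Nat) : Int) = (k : Int) + 1 by omega]
        exact PySem.List.pyRange_one_succ_right (by exact_mod_cast hk)
      have hstep : pvStepB a (L, (r:Int)) (k:Int)
          = if a.getD k 0 - a.getD (k-1) 0 ≠ 1
            then (L ++ (a.drop (r+1)).take (k - 1 - (r+1)), (k:Int))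
            else (L, (r:Int)) := by
        unfold pvStepB
        rw [show ((k:Int) - 1) = ((k - 1 : Nat) : Int) by omega]
        simp only [PySem.List.pyGetD_natCast]
        split_ifs with hcond
        · rw [show ((r:Int) + 1) = ((r + 1 : Nat) : Int) by omega, PySem.List.slice_natCast]
        · rfl
      rw [hrange, List.foldl_append]
      simp only [List.foldl_cons, List.foldl_nil]
      rw [hfold, hstep]
      -- how the filtered range over 1..k-1 grows when index k-1 is appended (k ≥ 2)
      have hRHS : ∀ (c : Bool),
          (c = decide ((a.getD (k-1) 0 - a.getD (k-2) 0 = 1) ∧ (a.getD k 0 - a.getD (k-1) 0 = 1))) →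
          2 ≤ k →
          ((PySem.List.pyRange 1 (((k+1:Nat) : Int) - 1) 1).filter
            (fun i => decide (PySem.List.pyGetD a i 0 - PySem.List.pyGetD a (i - 1) 0 = 1 ∧
                              PySem.List.pyGetD a (i + 1) 0 - PySem.List.pyGetD a i 0 = 1))).map
            (fun i => PySem.List.pyGetD a i 0)
          = ((PySem.List.pyRange 1 ((k : Int) - 1) 1).filter
            (fun i => decide (PySem.List.pyGetD a i 0 - PySem.List.pyGetD a (i - 1) 0 = 1 ∧
                              PySem.List.pyGetD a (i + 1) 0 - PySem.List.pyGetD a i 0 = 1))).map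
            (fun i => PySem.List.pyGetD a i 0)
            ++ (if c then [a.getD (k-1) 0] else []) := by
        intro c hc h2
        have hsplit : PySem.List.pyRange 1 (((k+1:Nat) : Int) - 1) 1
            = PySem.List.pyRange 1 ((k : Int) - 1) 1 ++ [((k:Int) - 1)] := by
          rw [show (((k+1:Nat) : Int) - 1) = ((k:Int) - 1) + 1 by omega]
          exact PySem.List.pyRange_one_succ_right (by omega)
        rw [hsplit, List.filter_append, List.map_append]
        congr 1
        rw [show ((k:Int) - 1) = ((k - 1 : Nat) : Int) by omega]
        have e2 : ((k - 1 : Nat) : Int) - 1 = ((k - 2 : Nat) : Int) := by omega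
        have e3 : ((k - 1 : Nat) : Int) + 1 = ((k : Nat) : Int) := by omega
        simp only [List.filter_cons, List.filter_nil, e2, e3, PySem.List.pyGetD_natCast]
        subst hc
        split_ifs with hd
        · simp
        · rfl
      by_cases hc : a.getD k 0 - a.getD (k-1) 0 = 1
      · -- run continues: state unchanged
        rw [if_neg (by simpa using hc)]
        refine ⟨L, r, rfl, by omega, hrs, ?_, ?_⟩
        · intro j hj1 hj2
          rcases Nat.lt_or_ge j k with hlt | hge
          · exact hrun j hj1 hlt
          · have : j = k := by omega
            subst this; exact hc
        · rcases Nat.lt_or_ge k 2 with h2 | h2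
          · -- k = 1 : both sides stay as at the base
            have hk1 : k = 1 := by omega
            subst hk1
            have hr0 : r = 0 := by omega
            subst hr0
            rw [show (((1+1:Nat) : Int)) - 1 = 1 by norm_num,
                PySem.List.pyRange_one_eq_nil le_rfl]
            rw [show (((1:Nat) : Int)) - 1 = 0 by norm_num,
                PySem.List.pyRange_one_eq_nil (by norm_num)] at heq
            simpa using heq
          · by_cases hr1 : k ≤ r + 1
            · -- r = k - 1 : the pending run has no interior yet, index k-1 is a run start
              have hr : r = k - 1 := by omega
              have hne : a.getD (k-1) 0 - a.getD (k-2) 0 ≠ 1 := by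
                rcases hrs with h0 | hne
                · omega
                · rw [hr, show k - 1 - 1 = k - 2 by omega] at hne
                  exact hne
              rw [hRHS false (decide_eq_false (fun hpq => hne hpq.1)).symm h2]
              rw [show k - 1 - (r + 1) = 0 by omega] at heq
              rw [show k + 1 - 1 - (r + 1) = 0 by omega]
              simpa using heq
            · -- interior grows by a[k-1]
              have hd1 : a.getD (k-1) 0 - a.getD (k-2) 0 = 1 := by
                have := hrun (k-1) (by omega) (by omega)
                rwa [show k - 1 - 1 = k - 2 by omega] at this
              have hgrow : (a.drop (r+1)).take ((k+1) - 1 - (r+1))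
                  = (a.drop (r+1)).take (k - 1 - (r+1)) ++ [a.getD (k-1) 0] := by
                rw [show (k+1) - 1 - (r+1) = (k - 1 - (r+1)) + 1 by omega,
                    pvTakeSnoc a (r+1) (k - 1 - (r+1)) (by omega),
                    show r + 1 + (k - 1 - (r + 1)) = k - 1 by omega]
              rw [hRHS true (decide_eq_true ⟨hd1, hc⟩).symm h2, hgrow, ← List.append_assoc, heq,
                  List.append_assoc]
              simp
      · -- run breaks at k : flush the pending interior, k becomes the new run start
        rw [if_pos (by simpa using hc)]
        refine ⟨L ++ (a.drop (r+1)).take (k - 1 - (r+1)), k, rfl, by omega, Or.inr hc,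
          by omega, ?_⟩
        rw [show k + 1 - 1 - (k + 1) = 0 by omega]
        rcases Nat.lt_or_ge k 2 with h2 | h2
        · have hk1 : k = 1 := by omega
          subst hk1
          have hr0 : r = 0 := by omega
          subst hr0
          rw [show (((1+1:Nat) : Int)) - 1 = 1 by norm_num,
              PySem.List.pyRange_one_eq_nil le_rfl]
          rw [show (((1:Nat) : Int)) - 1 = 0 by norm_num,
              PySem.List.pyRange_one_eq_nil (by norm_num)] at heq
          simpa using heq
        · rw [hRHS false (decide_eq_false (fun hpq => hc hpq.2)).symm h2]
          simpa using heq

theorem pv_main (adapters : List Int) (h : adapters ≠ []) :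
    list_removable adapters = list_removable_alt adapters := by
  have hlen : 1 ≤ adapters.length := List.length_pos_iff.mpr h
  obtain ⟨L, r, hfold, hrk, hrs, hrun, heq⟩ :=
    pvInvB adapters (if PySem.List.pyGetD adapters 0 0 = 1 then [1] else [])
      adapters.length hlen le_rfl
  have hA : list_removable adapters
      = (if PySem.List.pyGetD adapters 0 0 = 1 then [1] else [])
        ++ ((PySem.List.pyRange 1 ((adapters.length : Int) - 1) 1).filter
              (fun i => decide (PySem.List.pyGetD adapters i 0 - PySem.List.pyGetD adapters (i - 1) 0 = 1 ∧
                                PySem.List.pyGetD adapters (i + 1) 0 - PySem.List.pyGetD adapters i 0 = 1))).map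
              (fun i => PySem.List.pyGetD adapters i 0) := by
    exact PySem.List.foldl_append_ite _ _ _ _
  have hB : list_removable_alt adapters
      = L ++ PySem.List.slice adapters (some ((r : Int) + 1)) (some ((adapters.length : Int) - 1)) := by
    show ((PySem.List.pyRange 1 (adapters.length : Int) 1).foldl (pvStepB adapters)
            ((if PySem.List.pyGetD adapters 0 0 = 1 then [1] else []), (0 : Int))).1
          ++ PySem.List.slice adapters
              (some (((PySem.List.pyRange 1 (adapters.length : Int) 1).foldl (pvStepB adapters)
                ((if PySem.List.pyGetD adapters 0 0 = 1 then [1] else []), (0 : Int))).2 + 1))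
              (some ((adapters.length : Int) - 1)) = _
    rw [hfold]
  rw [hA, hB]
  rw [show ((r : Int) + 1) = ((r + 1 : Nat) : Int) by push_cast; ring,
      show ((adapters.length : Int) - 1) = ((adapters.length - 1 : Nat) : Int) by omega,
      PySem.List.slice_natCast]
  rw [show ((adapters.length - 1 : Nat) : Int) = (adapters.length : Int) - 1 by omega]
  exact heq.symm

-- ===== VERDICT (by name: the statement is the Claim_ definition above) =====
theorem list_removable_spec : Claim_equal_list_removable := by
  intro adapters _ hpre
  unfold Spec_list_removable
  exact pv_main adapters hpre
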